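-- pv_equiv track=rewrite | github.com/vschs007/scrapcodes | max_subsequence.py | printSubsequences
-- ===== SOURCE A (Python) =====
-- import  itertools
--
-- def bitwise(arr,k):
--     n=len(arr)
--     count=0
--     for i in range(n-1):
--             if(arr[i]^arr[i+1] == k):
--                 count=count+1
--             else:
--                 break
--     if count==len(arr)-1:
--         return True
--     else:
--         return False
--
-- def printSubsequences(arr,k):
--     newarr=[]
--     maxx=0
--     for r in range(1,len(arr)+1):
--         for c in itertools.combinations(arr,r):
--             if(bitwise(c,k)):
--                 newarr.append(c)
--     for i in range(len(newarr)):
--         currlen = len(newarr[i])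
--         maxx=max(currlen,maxx)
--     if(maxx>=2):
--         return maxx
--     else:
--         return 0
-- ===== SOURCE B (Python) =====
-- def printSubsequences(arr, k):
--     best = {}
--     ans = 0
--     for v in arr:
--         cur = max(best.get(v, 0), best.get(v ^ k, 0) + 1)
--         best[v] = cur
--         ans = max(ans, cur)
--     return ans if ans >= 2 else 0
-- ===== Notes on version B (the rewrite author's own statement) =====
-- stated objective: faster
-- what changed: Replaced the exponential enumeration of all itertools.combinations (checking each for the consecutive-XOR chain property) with a one-pass value-indexed dynamic program best[v] = max(best[v], best[v^k]+1) that tracks the longest chain ending at each value.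
import Mathlib
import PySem

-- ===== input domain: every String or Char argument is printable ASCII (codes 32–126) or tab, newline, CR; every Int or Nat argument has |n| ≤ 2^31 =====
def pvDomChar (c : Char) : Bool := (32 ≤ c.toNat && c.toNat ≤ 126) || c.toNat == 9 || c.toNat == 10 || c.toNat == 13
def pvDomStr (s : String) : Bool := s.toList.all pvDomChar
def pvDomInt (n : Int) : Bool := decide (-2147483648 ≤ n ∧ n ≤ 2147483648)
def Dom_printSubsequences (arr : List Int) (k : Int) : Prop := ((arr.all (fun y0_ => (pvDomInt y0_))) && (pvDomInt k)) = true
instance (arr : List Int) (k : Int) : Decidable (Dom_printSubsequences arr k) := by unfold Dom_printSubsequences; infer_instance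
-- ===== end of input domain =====

-- B replaces A's exponential scan of all combinations by a one-pass value-indexed DP (best[v] = max(best[v], best[v^k]+1)); equivalence of the returned value is proved for all inputs.

-- ===== PORT A =====
-- count of leading consecutive pairs with xor = k (the Python loop with `break`)
def pvCountRun (k : Int) : List Int → Nat
  | a :: b :: t => if PySem.Int.bxor a b = k then pvCountRun k (b :: t) + 1 else 0
  | _ => 0

def bitwise (arr : List Int) (k : Int) : Bool :=
  ((pvCountRun k arr : Int) == (arr.length : Int) - 1)

def printSubsequences (arr : List Int) (k : Int) : Int :=
  let newarr := (PySem.List.pyRange 1 ((arr.length : Int) + 1)).foldl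
    (fun acc r => acc ++ (List.sublistsLen r.toNat arr).filter (fun c => bitwise c k)) []
  let maxx := newarr.foldl (fun maxx c => max ((c.length : Int)) maxx) 0
  if maxx ≥ 2 then maxx else 0

-- ===== PORT B =====
def printSubsequences_alt (arr : List Int) (k : Int) : Int :=
  let s := arr.foldl (fun (s : PySem.Dict Int Int × Int) v =>
    let cur := max (s.1.getD v 0) (s.1.getD (PySem.Int.bxor v k) 0 + 1)
    (s.1.insert v cur, max s.2 cur)) ((PySem.Dict.empty : PySem.Dict Int Int), 0)
  if s.2 ≥ 2 then s.2 else 0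

-- ===== PRECONDITION & SPEC =====
def Spec_printSubsequences (arr : List Int) (k : Int) (out : Int) : Prop := out = printSubsequences_alt arr k
instance (arr : List Int) (k : Int) (out : Int) : Decidable (Spec_printSubsequences arr k out) := by unfold Spec_printSubsequences; infer_instance

-- ===== CLAIM (what is proved, stated in full; the proofs are below) =====
def Claim_equal_printSubsequences : Prop := ∀ (arr : List Int) (k : Int), Dom_printSubsequences arr k → Spec_printSubsequences arr k (printSubsequences arr k)

-- ===== LEMMAS AND PROOFS =====

-- max length (as Int) of the lists in l, 0 for []
def pvM (l : List (List Int)) : Int := (l.map (fun c => (c.length : Int))).foldl max 0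

-- the consecutive-xor-equals-k chain property
def pvChain (k : Int) : List Int → Bool
  | [] => true
  | [_] => true
  | a :: b :: t => (PySem.Int.bxor a b == k) && pvChain k (b :: t)

-- max length of a nonempty chain sublist of arr
def pvMX (arr : List Int) (k : Int) : Int :=
  pvM (arr.sublists.filter (fun c => !c.isEmpty && pvChain k c))

-- max length of a chain sublist of arr ending with value x
def pvBE (arr : List Int) (k x : Int) : Int :=
  pvM (arr.sublists.filter (fun c => pvChain k c && c.getLast? == some x))

theorem pvFoldlMax (l : List Int) (a b : Int) :
    l.foldl max (max a b) = max a (l.foldl max b) := by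
  induction l generalizing a b with
  | nil => rfl
  | cons h t ih =>
    simp only [List.foldl_cons]
    rw [max_assoc, ih]

theorem pvM_nil : pvM [] = 0 := rfl

theorem pvM_cons (c : List Int) (l : List (List Int)) :
    pvM (c :: l) = max (c.length : Int) (pvM l) := by
  simp only [pvM, List.map_cons, List.foldl_cons]
  rw [show max 0 (c.length : Int) = max (c.length : Int) 0 from max_comm _ _, pvFoldlMax]

theorem pvM_nonneg (l : List (List Int)) : 0 ≤ pvM l := by
  induction l with
  | nil => simp [pvM_nil]
  | cons c t ih => rw [pvM_cons]; omega

theorem pvM_append (l1 l2 : List (List Int)) :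
    pvM (l1 ++ l2) = max (pvM l1) (pvM l2) := by
  induction l1 with
  | nil =>
    have := pvM_nonneg l2
    simp only [List.nil_append, pvM_nil]
    omega
  | cons c t ih => simp only [List.cons_append, pvM_cons, ih]; omega

theorem pvFoldlMaxg (l : List (List Int)) (a : Int) :
    l.foldl (fun m c => max ((c.length : Int)) m) a = (l.map (fun c => (c.length : Int))).foldl max a := by
  induction l generalizing a with
  | nil => rfl
  | cons c t ih => simp only [List.foldl_cons, List.map_cons]; rw [ih, max_comm]

theorem pvBxorCancel (a b : Int) : PySem.Int.bxor (PySem.Int.bxor a b) b = a := by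
  unfold PySem.Int.bxor
  by_cases ha : 0 ≤ a <;> by_cases hb : 0 ≤ b <;>
    simp only [ha, hb, if_true, if_false, ite_true, ite_false, if_pos, if_neg] <;>
    split_ifs <;>
    first
      | (simp [Nat.xor_xor_cancel_right]; omega)
      | omega

theorem pvBxorIff (a v k : Int) : PySem.Int.bxor a v = k ↔ a = PySem.Int.bxor v k := by
  constructor
  · intro h
    rw [← h, PySem.Int.bxor_comm v (PySem.Int.bxor a v), pvBxorCancel]
  · intro h
    rw [h, PySem.Int.bxor_comm v k, pvBxorCancel]

theorem pvChain_concat (k v : Int) (c : List Int) :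
    pvChain k (c ++ [v]) =
      (pvChain k c && (c.getLast? == some (PySem.Int.bxor v k) || c.isEmpty)) := by
  induction c with
  | nil => rfl
  | cons a t ih =>
    cases t with
    | nil =>
      have hiff : (PySem.Int.bxor a v = k) ↔ (a = PySem.Int.bxor v k) := pvBxorIff a v k
      by_cases h : PySem.Int.bxor a v = k
      · simp [pvChain, h, hiff.mp h, PySem.Int.bxor_comm v k, pvBxorCancel]
      · simp [pvChain, h, PySem.Int.bxor_comm v k]
        exact fun hh => h (hiff.mpr (by rw [PySem.Int.bxor_comm k v] at hh; exact hh))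
    | cons b t' =>
      rw [List.cons_append] at ih
      simp only [List.cons_append, pvChain, ih, List.getLast?_cons_cons, List.isEmpty_cons,
        Bool.or_false, Bool.and_assoc]

theorem pvBitwiseAux (k : Int) (t : List Int) : ∀ (a : Int),
    ((pvCountRun k (a :: t) : Int) = ((a :: t).length : Int) - 1) ↔ pvChain k (a :: t) = true := by
  induction t with
  | nil => intro a; simp [pvCountRun, pvChain]
  | cons b t' ih =>
    intro a
    by_cases h : PySem.Int.bxor a b = k
    · simp only [pvCountRun, pvChain, h, if_true, beq_self_eq_true, Bool.true_and, List.length_cons]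
      rw [← ih b]
      simp only [List.length_cons]
      push_cast
      constructor <;> intro <;> omega
    · have hh : (PySem.Int.bxor a b == k) = false := by simp [h]
      simp only [pvCountRun, pvChain, h, if_false, hh, Bool.false_and, List.length_cons,
        Bool.false_eq_true, iff_false]
      push_cast
      omega

theorem pvBitwise_eq (c : List Int) (k : Int) :
    bitwise c k = (!c.isEmpty && pvChain k c) := by
  cases c with
  | nil => simp [bitwise, pvCountRun]
  | cons a t =>
    simp only [bitwise, List.isEmpty_cons, Bool.not_false, Bool.true_and]
    rw [Bool.eq_iff_iff]
    simp only [beq_iff_eq]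
    exact pvBitwiseAux k t a

theorem pvM_map_concat (v : Int) (l : List (List Int)) (h : l ≠ []) :
    pvM (l.map (fun c => c ++ [v])) = pvM l + 1 := by
  induction l with
  | nil => exact absurd rfl h
  | cons c t ih =>
    cases t with
    | nil =>
      simp only [List.map_cons, List.map_nil, pvM_cons, pvM_nil, List.length_append,
        List.length_singleton]
      push_cast
      omega
    | cons c' t' =>
      simp only [List.map_cons, pvM_cons] at *
      rw [ih (by simp)]
      simp only [List.length_append, List.length_singleton]
      push_cast
      omega

theorem pvM_filter_mono (l : List (List Int)) (q q' : List Int → Bool)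
    (h : ∀ c, q c = true → q' c = true) :
    pvM (l.filter q) ≤ pvM (l.filter q') := by
  induction l with
  | nil => simp [pvM_nil]
  | cons c t ih =>
    simp only [List.filter_cons]
    by_cases hq : q c = true
    · simp only [hq, h c hq, if_true, pvM_cons]
      omega
    · have h0 := pvM_nonneg (t.filter q')
      by_cases hq' : q' c = true <;>
        simp only [hq, hq', if_true, if_false, Bool.false_eq_true, pvM_cons] <;>
        omega

theorem pvM_filter_or_empty (l : List (List Int)) (q : List Int → Bool) (hq : q [] = false) :
    pvM (l.filter (fun c => q c || c.isEmpty)) = pvM (l.filter q) := by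
  induction l with
  | nil => rfl
  | cons c t ih =>
    cases c with
    | nil =>
      simp only [List.filter_cons, List.isEmpty_nil, Bool.or_true, if_true, hq,
        Bool.false_eq_true, ite_false, pvM_cons, ih, List.length_nil]
      have := pvM_nonneg (t.filter q)
      push_cast
      omega
    | cons a c' =>
      simp only [List.filter_cons, List.isEmpty_cons, Bool.or_false] at *
      by_cases h : q (a :: c') = true <;> simp [h, pvM_cons, ih]

theorem pvBE_le_MX (p : List Int) (k x : Int) : pvBE p k x ≤ pvMX p k := by
  apply pvM_filter_mono
  intro c hc
  simp only [Bool.and_eq_true, beq_iff_eq] at hc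
  cases c with
  | nil => simp at hc
  | cons a t => simp [hc.1]

theorem pvAux (p : List Int) (k w : Int) :
    pvM (p.sublists.filter (fun c => pvChain k c && (c.getLast? == some w || c.isEmpty))) =
      pvBE p k w := by
  have hpt : ∀ c ∈ p.sublists,
      (pvChain k c && (c.getLast? == some w || c.isEmpty))
        = ((pvChain k c && (c.getLast? == some w)) || c.isEmpty) := by
    intro c _
    cases c with
    | nil => simp [pvChain]
    | cons a t => simp
  rw [List.filter_congr hpt]
  exact pvM_filter_or_empty _ _ (by simp [pvChain])

theorem pvBE_concat (p : List Int) (v k x : Int) :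
    pvBE (p ++ [v]) k x =
      if x = v then max (pvBE p k v) (pvBE p k (PySem.Int.bxor v k) + 1) else pvBE p k x := by
  unfold pvBE
  rw [List.sublists_concat, List.filter_append, pvM_append, List.filter_map]
  by_cases hx : x = v
  · subst hx
    have hpt : ∀ c ∈ p.sublists,
        ((fun c => pvChain k c && (c.getLast? == some x)) ∘ (fun c => c ++ [x])) c
          = (pvChain k c && (c.getLast? == some (PySem.Int.bxor x k) || c.isEmpty)) := by
      intro c _
      simp only [Function.comp_apply, pvChain_concat, List.getLast?_concat]
      simp
    rw [List.filter_congr hpt]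
    rw [pvM_map_concat x _ (List.ne_nil_of_mem (List.mem_filter.mpr
      ⟨List.mem_sublists.mpr (List.nil_sublist p), by simp [pvChain]⟩))]
    rw [pvAux]
    simp [pvBE]
  · have hpt : ∀ c ∈ p.sublists,
        ((fun c => pvChain k c && (c.getLast? == some x)) ∘ (fun c => c ++ [v])) c = false := by
      intro c _
      have hlast : ((c ++ [v]).getLast? == some x) = false := by
        simp
        exact fun hh => hx hh.symm
      simp only [Function.comp_apply, hlast, Bool.and_false]
    rw [List.filter_congr hpt]
    simp only [List.filter_false, List.map_nil, pvM_nil]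
    have := pvM_nonneg (p.sublists.filter (fun c => pvChain k c && (c.getLast? == some x)))
    rw [if_neg hx]
    omega

theorem pvMX_concat (p : List Int) (v k : Int) :
    pvMX (p ++ [v]) k = max (pvMX p k) (pvBE p k (PySem.Int.bxor v k) + 1) := by
  unfold pvMX
  rw [List.sublists_concat, List.filter_append, pvM_append, List.filter_map]
  have hpt : ∀ c ∈ p.sublists,
      ((fun c => !c.isEmpty && pvChain k c) ∘ (fun c => c ++ [v])) c
        = (pvChain k c && (c.getLast? == some (PySem.Int.bxor v k) || c.isEmpty)) := by
    intro c _
    simp [Function.comp_apply, pvChain_concat]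
  rw [List.filter_congr hpt]
  rw [pvM_map_concat v _ (List.ne_nil_of_mem (List.mem_filter.mpr
    ⟨List.mem_sublists.mpr (List.nil_sublist p), by simp [pvChain]⟩))]
  rw [pvAux]

theorem pvM_perm {l1 l2 : List (List Int)} (h : l1.Perm l2) : pvM l1 = pvM l2 := by
  unfold pvM
  exact (h.map _).foldl_op_eq

theorem pvA_eq (arr : List Int) (k : Int) :
    printSubsequences arr k = if pvMX arr k ≥ 2 then pvMX arr k else 0 := by
  simp only [printSubsequences]
  rw [PySem.List.foldl_append_eq_flatMap, List.nil_append, pvFoldlMaxg]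
  have hfun : (fun c => bitwise c k) = (fun c => !c.isEmpty && pvChain k c) :=
    funext (fun c => pvBitwise_eq c k)
  rw [hfun]
  have h1 : PySem.List.pyRange 1 ((arr.length : Int) + 1)
      = (List.range arr.length).map (fun j : Nat => (1 : Int) + (j : Int)) := by
    rw [PySem.List.pyRange_one]
    have : ((arr.length : Int) + 1 - 1).toNat = arr.length := by omega
    rw [this]
  rw [h1, List.flatMap_map]
  simp only [show ∀ j : Nat, ((1 : Int) + (j : Int)).toNat = j + 1 from fun j => by omega]
  have h3 : (List.range (arr.length + 1)).flatMap
        (fun r => (List.sublistsLen r arr).filter (fun c => !c.isEmpty && pvChain k c))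
      = (List.range arr.length).flatMap
        (fun j => (List.sublistsLen (j + 1) arr).filter (fun c => !c.isEmpty && pvChain k c)) := by
    rw [List.range_succ_eq_map, List.flatMap_cons, List.flatMap_map]
    simp [List.sublistsLen_zero]
  rw [← h3]
  have h4 : ((List.range (arr.length + 1)).flatMap
        (fun r => (List.sublistsLen r arr).filter (fun c => !c.isEmpty && pvChain k c))).Perm
      (arr.sublists.filter (fun c => !c.isEmpty && pvChain k c)) := by
    rw [← List.filter_flatMap]
    exact ((List.range_bind_sublistsLen_perm arr).trans
      (List.sublists_perm_sublists' arr).symm).filter _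
  have key := pvM_perm h4
  unfold pvM at key
  rw [key]
  rfl

theorem pvB_inv (k : Int) (arr : List Int) :
    (∀ x, ((arr.foldl (fun (s : PySem.Dict Int Int × Int) v =>
        (s.1.insert v (max (s.1.getD v 0) (s.1.getD (PySem.Int.bxor v k) 0 + 1)),
         max s.2 (max (s.1.getD v 0) (s.1.getD (PySem.Int.bxor v k) 0 + 1))))
        ((PySem.Dict.empty : PySem.Dict Int Int), 0)).1.getD x 0
        = pvBE arr k x))
    ∧ (arr.foldl (fun (s : PySem.Dict Int Int × Int) v =>
        (s.1.insert v (max (s.1.getD v 0) (s.1.getD (PySem.Int.bxor v k) 0 + 1)),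
         max s.2 (max (s.1.getD v 0) (s.1.getD (PySem.Int.bxor v k) 0 + 1))))
        ((PySem.Dict.empty : PySem.Dict Int Int), 0)).2
        = pvMX arr k := by
  induction arr using List.reverseRecOn with
  | nil =>
    constructor
    · intro x
      simp [PySem.Dict.getD_empty, pvBE, pvM, pvChain]
    · simp [pvMX, pvM, pvChain]
  | append_singleton p v ih =>
    obtain ⟨ihd, ihm⟩ := ih
    simp only [List.foldl_append, List.foldl_cons, List.foldl_nil]
    constructor
    · intro x
      rw [PySem.Dict.getD_insert, pvBE_concat, ihd x, ihd v, ihd (PySem.Int.bxor v k)]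
    · rw [pvMX_concat, ihm, ihd v, ihd (PySem.Int.bxor v k)]
      have := pvBE_le_MX p k v
      omega

-- ===== VERDICT (by name: the statement is the Claim_ definition above) =====
theorem printSubsequences_spec : Claim_equal_printSubsequences := by
  intro arr k _
  unfold Spec_printSubsequences
  rw [pvA_eq]
  simp only [printSubsequences_alt]
  rw [(pvB_inv k arr).2]
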